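-- pv_equiv track=rewrite | github.com/PedroChambelMartins/Apache_Log_Parser | parserApache.py | checkEntriesWithThresholds
-- ===== SOURCE A (Python) =====
-- def checkEntriesWithThresholds(elem_dic, warnThreshold, criticalThreshold):
--     warn_flag = False
--     critical_flag = False
--     for k, v in elem_dic.items():
--         if v > warnThreshold:
--             warn_flag = True
--         if v > criticalThreshold:
--             critical_flag = True
--     return warn_flag, critical_flag
-- ===== SOURCE B (Python) =====
-- def checkEntriesWithThresholds(elem_dic, warnThreshold, criticalThreshold):
--     m = max(elem_dic.values(), default=None)
--     if m is None:
--         return False, False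
--     return m > warnThreshold, m > criticalThreshold
-- ===== Notes on version B (the rewrite author's own statement) =====
-- stated objective: simpler
-- what changed: Replaces the flag-maintaining loop with a single aggregate: take the maximum of the values once and compare it with each threshold.
import Mathlib
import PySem

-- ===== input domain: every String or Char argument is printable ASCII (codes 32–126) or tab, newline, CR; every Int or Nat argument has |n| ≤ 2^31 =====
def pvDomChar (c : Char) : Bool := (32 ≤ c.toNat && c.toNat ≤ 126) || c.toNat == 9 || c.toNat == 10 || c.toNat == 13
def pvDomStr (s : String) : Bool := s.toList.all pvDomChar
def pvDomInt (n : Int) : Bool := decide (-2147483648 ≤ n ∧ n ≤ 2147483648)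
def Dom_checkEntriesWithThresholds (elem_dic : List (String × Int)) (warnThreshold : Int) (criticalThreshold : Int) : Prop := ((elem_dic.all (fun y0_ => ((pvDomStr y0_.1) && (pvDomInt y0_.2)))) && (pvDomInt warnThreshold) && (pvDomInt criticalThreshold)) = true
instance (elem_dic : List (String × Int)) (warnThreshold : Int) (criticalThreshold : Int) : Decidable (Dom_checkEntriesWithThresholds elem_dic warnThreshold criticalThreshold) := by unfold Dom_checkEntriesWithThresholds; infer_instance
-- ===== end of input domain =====

-- ===== PORT A =====
-- Port of A: fold over the dict items, updating the two flags in branch order.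
def checkEntriesWithThresholds (elem_dic : List (String × Int)) (warnThreshold : Int) (criticalThreshold : Int) : Bool × Bool :=
  let st := elem_dic.foldl
    (fun (st : Bool × Bool) kv =>
      let st := if kv.2 > warnThreshold then (true, st.2) else st
      if kv.2 > criticalThreshold then (st.1, true) else st)
    (false, false)
  st

-- ===== PORT B =====
-- Port of B: maximum of the values once, then compare with both thresholds.
def checkEntriesWithThresholds_alt (elem_dic : List (String × Int)) (warnThreshold : Int) (criticalThreshold : Int) : Bool × Bool :=
  match (elem_dic.map Prod.snd).max? with
  | none => (false, false)
  | some m => (decide (m > warnThreshold), decide (m > criticalThreshold))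

-- ===== PRECONDITION & SPEC =====
def Spec_checkEntriesWithThresholds (elem_dic : List (String × Int)) (warnThreshold : Int) (criticalThreshold : Int) (out : Bool × Bool) : Prop := out = checkEntriesWithThresholds_alt elem_dic warnThreshold criticalThreshold
instance (elem_dic : List (String × Int)) (warnThreshold : Int) (criticalThreshold : Int) (out : Bool × Bool) : Decidable (Spec_checkEntriesWithThresholds elem_dic warnThreshold criticalThreshold out) := by unfold Spec_checkEntriesWithThresholds; infer_instance

-- ===== CLAIM (what is proved, stated in full; the proofs are below) =====
def Claim_equal_checkEntriesWithThresholds : Prop := ∀ (elem_dic : List (String × Int)) (warnThreshold : Int) (criticalThreshold : Int), Dom_checkEntriesWithThresholds elem_dic warnThreshold criticalThreshold → Spec_checkEntriesWithThresholds elem_dic warnThreshold criticalThreshold (checkEntriesWithThresholds elem_dic warnThreshold criticalThreshold)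

-- ===== LEMMAS AND PROOFS =====

-- A's fold computes, for each threshold, whether ANY value exceeds it.
theorem foldl_flags (l : List (String × Int)) (w c : Int) (a b : Bool) :
    l.foldl
      (fun (st : Bool × Bool) kv =>
        let st := if kv.2 > w then (true, st.2) else st
        if kv.2 > c then (st.1, true) else st)
      (a, b)
    = (a || l.any (fun kv => decide (kv.2 > w)), b || l.any (fun kv => decide (kv.2 > c))) := by
  induction l generalizing a b with
  | nil => simp
  | cons hd tl ih =>
    simp only [List.foldl_cons, List.any_cons]
    by_cases h1 : hd.2 > w <;> by_cases h2 : hd.2 > c <;>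
      simp [h1, h2, ih]

-- B's maximum exceeds t iff some value does.
theorem max_any (l : List (String × Int)) (t : Int) :
    (match (l.map Prod.snd).max? with
     | none => false
     | some m => decide (m > t))
    = l.any (fun kv => decide (kv.2 > t)) := by
  cases hm : (l.map Prod.snd).max? with
  | none =>
    have : l.map Prod.snd = [] := List.max?_eq_none_iff.mp hm
    simp [List.map_eq_nil_iff.mp this]
  | some m =>
    rw [List.max?_eq_some_iff] at hm
    obtain ⟨hmem, hub⟩ := hm
    simp only []
    by_cases h : m > t
    · obtain ⟨kv, hkv, rfl⟩ := List.mem_map.mp hmem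
      have : l.any (fun kv => decide (kv.2 > t)) = true :=
        List.any_eq_true.mpr ⟨kv, hkv, by simpa using h⟩
      simp [h, this]
    · have : l.any (fun kv => decide (kv.2 > t)) = false := by
        rw [List.any_eq_false]
        intro kv hkv
        have := hub kv.2 (List.mem_map.mpr ⟨kv, hkv, rfl⟩)
        simp; omega
      simp [h, this]

-- ===== VERDICT (by name: the statement is the Claim_ definition above) =====
theorem checkEntriesWithThresholds_spec : Claim_equal_checkEntriesWithThresholds := by
  intro l w c _
  unfold Spec_checkEntriesWithThresholds checkEntriesWithThresholds checkEntriesWithThresholds_alt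
  rw [foldl_flags]
  rw [← max_any l w, ← max_any l c]
  cases (l.map Prod.snd).max? <;> simp
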